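-- pv_equiv track=rewrite | github.com/TGM-HWI-SWP/lagerverwaltung-autozuhandler | src/services/auth_service.py | normalize_db_list
-- ===== SOURCE A (Python) =====
-- def normalize_db_list(values):
--     seen = set()
--     result = []
--     for v in values:
--         val = str(v).strip()
--         if val and val.lower() not in seen:
--             seen.add(val.lower())
--             result.append(val)
--     result.sort(key=lambda x: x.lower())
--     return result
-- ===== SOURCE B (Python) =====
-- def normalize_db_list(values):
--     cleaned = [s for s in (str(v).strip() for v in values) if s]
--     cleaned.sort(key=str.lower)
--     result = []
--     last = None
--     for s in cleaned:
--         k = s.lower()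
--         if k != last:
--             result.append(s)
--             last = k
--     return result
-- ===== Notes on version B (the rewrite author's own statement) =====
-- stated objective: alternative
-- what changed: A dedups with an auxiliary seen-set while scanning and then sorts; B strips/filters first, stably sorts by lowercase, and dedups in one adjacency pass (no set), relying on sort stability to keep the first-in-input casing.
import Mathlib
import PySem

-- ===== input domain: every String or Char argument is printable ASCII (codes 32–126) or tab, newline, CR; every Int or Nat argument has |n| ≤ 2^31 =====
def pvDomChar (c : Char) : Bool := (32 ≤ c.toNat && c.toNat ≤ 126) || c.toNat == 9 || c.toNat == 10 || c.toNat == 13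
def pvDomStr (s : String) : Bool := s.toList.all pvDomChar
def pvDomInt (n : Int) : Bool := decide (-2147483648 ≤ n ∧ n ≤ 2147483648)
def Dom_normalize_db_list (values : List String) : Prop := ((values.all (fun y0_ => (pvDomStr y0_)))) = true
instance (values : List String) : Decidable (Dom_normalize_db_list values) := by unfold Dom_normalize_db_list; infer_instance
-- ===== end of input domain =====

-- B differs from A by decomposition: A dedups with a seen-set while scanning, then sorts;
-- B strips/filters, stably sorts by lowercase, and dedups by adjacency in one pass (no set).

-- ===== PORT A =====
def normalize_db_list (values : List String) : List String :=
  let st := values.foldl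
    (fun (st : PySem.Set String × List String) v =>
      let val := PySem.Str.strip v
      if val != "" && !(PySem.Set.contains st.1 (PySem.Str.lower val)) then
        (PySem.Set.add st.1 (PySem.Str.lower val), st.2 ++ [val])
      else st)
    (PySem.Set.empty, [])
  PySem.List.sorted st.2 (fun x => PySem.Str.lower x) false

-- ===== PORT B =====
def normalize_db_list_alt (values : List String) : List String :=
  let cleaned := (values.map (fun v => PySem.Str.strip v)).filter (fun s => s != "")
  let srt := PySem.List.sorted cleaned (fun x => PySem.Str.lower x) false
  (srt.foldl
    (fun (st : Option String × List String) s =>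
      let k := PySem.Str.lower s
      if some k != st.1 then (some k, st.2 ++ [s]) else st)
    (none, [])).2

-- ===== PRECONDITION & SPEC =====
def Spec_normalize_db_list (values : List String) (out : List String) : Prop := out = normalize_db_list_alt values
instance (values : List String) (out : List String) : Decidable (Spec_normalize_db_list values out) := by unfold Spec_normalize_db_list; infer_instance

-- ===== CLAIM (what is proved, stated in full; the proofs are below) =====
def Claim_equal_normalize_db_list : Prop := ∀ (values : List String), Dom_normalize_db_list values → Spec_normalize_db_list values (normalize_db_list values)

-- ===== LEMMAS AND PROOFS =====

-- Dedup-by-lowercase-key with a set of already-seen keys (proof model of A's loop).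
def dK (seen : PySem.Set String) : List String → List String
  | [] => []
  | a :: l =>
    if PySem.Set.contains seen (PySem.Str.lower a) then dK seen l
    else a :: dK (PySem.Set.add seen (PySem.Str.lower a)) l

-- Adjacency dedup with the last kept key (proof model of B's loop).
def dd (last : Option String) : List String → List String
  | [] => []
  | a :: l =>
    if some (PySem.Str.lower a) != last then a :: dd (some (PySem.Str.lower a)) l
    else dd last l

theorem bool_not_true {b : Bool} (h : ¬ b = true) : b = false := by
  cases b
  · rfl
  · exact absurd rfl h

-- A's fold = dK over the cleaned list
theorem foldA_eq (values : List String) (seen : PySem.Set String) (res : List String) :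
    (values.foldl
      (fun (st : PySem.Set String × List String) v =>
        let val := PySem.Str.strip v
        if val != "" && !(PySem.Set.contains st.1 (PySem.Str.lower val)) then
          (PySem.Set.add st.1 (PySem.Str.lower val), st.2 ++ [val])
        else st)
      (seen, res)).2
    = res ++ dK seen ((values.map (fun v => PySem.Str.strip v)).filter (fun s => s != "")) := by
  induction values generalizing seen res with
  | nil => simp only [List.foldl_nil, List.map_nil, List.filter_nil, dK, List.append_nil]
  | cons v rest ih =>
    simp only [List.foldl_cons, List.map_cons, List.filter_cons]
    by_cases h1 : PySem.Str.strip v = ""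
    · have hc : (PySem.Str.strip v != "" && !(PySem.Set.contains seen (PySem.Str.lower (PySem.Str.strip v)))) = false := by
        rw [h1]; rfl
      have hf : (PySem.Str.strip v != "") = false := by rw [h1]; rfl
      rw [hc, if_neg (by simp), ih, hf, if_neg (by simp)]
    · have hf : (PySem.Str.strip v != "") = true := bne_iff_ne.mpr h1
      by_cases h2 : PySem.Set.contains seen (PySem.Str.lower (PySem.Str.strip v)) = true
      · have hc : (PySem.Str.strip v != "" && !(PySem.Set.contains seen (PySem.Str.lower (PySem.Str.strip v)))) = false := by
          rw [h2, hf]; rfl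
        rw [hc, if_neg (by simp), ih, hf, if_pos rfl]
        simp only [dK]
        rw [h2, if_pos rfl]
      · have h2f : PySem.Set.contains seen (PySem.Str.lower (PySem.Str.strip v)) = false := bool_not_true h2
        have hc : (PySem.Str.strip v != "" && !(PySem.Set.contains seen (PySem.Str.lower (PySem.Str.strip v)))) = true := by
          rw [h2f, hf]; rfl
        rw [hc, if_pos rfl, ih, hf, if_pos rfl]
        simp only [dK]
        rw [h2f, if_neg (by simp), List.append_assoc, List.singleton_append]

-- B's fold = dd
theorem foldB_eq (l : List String) (last : Option String) (out : List String) :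
    (l.foldl
      (fun (st : Option String × List String) s =>
        let k := PySem.Str.lower s
        if some k != st.1 then (some k, st.2 ++ [s]) else st)
      (last, out)).2 = out ++ dd last l := by
  induction l generalizing last out with
  | nil => simp only [List.foldl_nil, dd, List.append_nil]
  | cons a l ih =>
    simp only [List.foldl_cons]
    by_cases h : (some (PySem.Str.lower a) != last) = true
    · rw [h, if_pos rfl, ih]
      simp only [dd]
      rw [h, if_pos rfl, List.append_assoc, List.singleton_append]
    · have hfl : (some (PySem.Str.lower a) != last) = false := bool_not_true h
      rw [hfl, if_neg (by simp), ih]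
      simp only [dd]
      rw [hfl, if_neg (by simp)]

-- inserting an element whose key equals the current state key is invisible to dd
theorem dd_insert_eq_key (x : String) (t : List String)
    (ht : t.Pairwise (fun a b => PySem.Str.lower a ≤ PySem.Str.lower b))
    (hmin : ∀ a ∈ t, PySem.Str.lower x ≤ PySem.Str.lower a) :
    dd (some (PySem.Str.lower x))
        (PySem.List.insertBy (fun a b => decide (PySem.Str.lower a < PySem.Str.lower b)) x t)
      = dd (some (PySem.Str.lower x)) t := by
  induction t with
  | nil =>
    simp only [PySem.List.insertBy, dd, bne_self_eq_false]
    rw [if_neg (by simp)]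
  | cons a r ih =>
    rw [List.pairwise_cons] at ht
    simp only [PySem.List.insertBy]
    by_cases h : PySem.Str.lower x < PySem.Str.lower a
    · rw [if_pos (decide_eq_true h)]
      have hskipx : dd (some (PySem.Str.lower x)) (x :: a :: r) = dd (some (PySem.Str.lower x)) (a :: r) := by
        simp only [dd, bne_self_eq_false]
        rw [if_neg (by simp)]
      rw [hskipx]
    · have hax : PySem.Str.lower a = PySem.Str.lower x :=
        le_antisymm (not_lt.1 h) (hmin a List.mem_cons_self)
      rw [if_neg (by simp only [decide_eq_true_eq]; exact h)]
      have hskip : ∀ l, dd (some (PySem.Str.lower x)) (a :: l) = dd (some (PySem.Str.lower x)) l := by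
        intro l
        simp only [dd, hax, bne_self_eq_false]
        rw [if_neg (by simp)]
      rw [hskip, hskip, ih ht.2 (fun b hb => by rw [← hax]; exact ht.1 b hb)]

-- Main interchange: adjacency dedup after a stable insert vs inserting into the dedup
theorem dd_insertBy (x : String) (s : List String)
    (hs : s.Pairwise (fun a b => PySem.Str.lower a ≤ PySem.Str.lower b))
    (last : Option String)
    (hl : ∀ k, last = some k → k < PySem.Str.lower x) :
    dd last (PySem.List.insertBy (fun a b => decide (PySem.Str.lower a < PySem.Str.lower b)) x s)
    = if (s.map (fun a => PySem.Str.lower a)).contains (PySem.Str.lower x) then dd last s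
      else PySem.List.insertBy (fun a b => decide (PySem.Str.lower a < PySem.Str.lower b)) x (dd last s) := by
  induction s generalizing last with
  | nil =>
    have hne : (some (PySem.Str.lower x) != last) = true := by
      cases last with
      | none => rfl
      | some k =>
        refine bne_iff_ne.mpr (fun hh => ?_)
        rw [Option.some.injEq] at hh
        have hk := hl k rfl
        rw [← hh] at hk
        exact absurd hk (lt_irrefl _)
    have hd1 : dd last [x] = [x] := by
      simp only [dd]
      rw [hne, if_pos rfl]
    have hd2 : dd last ([] : List String) = [] := rfl
    simp only [PySem.List.insertBy, List.map_nil, List.contains_nil, hd2]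
    rw [hd1, if_neg (by simp)]
  | cons y t ih =>
    rw [List.pairwise_cons] at hs
    simp only [PySem.List.insertBy]
    by_cases hxy : PySem.Str.lower x < PySem.Str.lower y
    · rw [if_pos (decide_eq_true hxy)]
      have hxne : (some (PySem.Str.lower x) != last) = true := by
        cases last with
        | none => rfl
        | some k =>
          refine bne_iff_ne.mpr (fun hh => ?_)
          rw [Option.some.injEq] at hh
          have hk := hl k rfl
          rw [← hh] at hk
          exact absurd hk (lt_irrefl _)
      have hyxne : (some (PySem.Str.lower y) != some (PySem.Str.lower x)) = true := by
        refine bne_iff_ne.mpr (fun hh => ?_)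
        rw [Option.some.injEq] at hh
        rw [hh] at hxy
        exact absurd hxy (lt_irrefl _)
      have hylastne : (some (PySem.Str.lower y) != last) = true := by
        cases last with
        | none => rfl
        | some k =>
          refine bne_iff_ne.mpr (fun hh => ?_)
          rw [Option.some.injEq] at hh
          have hk := lt_trans (hl k rfl) hxy
          rw [← hh] at hk
          exact absurd hk (lt_irrefl _)
      have hnm : ((y :: t).map (fun a => PySem.Str.lower a)).contains (PySem.Str.lower x) = false := by
        simp only [List.map_cons, List.contains_cons]
        have hb1 : (PySem.Str.lower x == PySem.Str.lower y) = false := by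
          refine beq_eq_false_iff_ne.mpr (fun hh => ?_)
          rw [hh] at hxy
          exact absurd hxy (lt_irrefl _)
        have hb2 : (t.map (fun a => PySem.Str.lower a)).contains (PySem.Str.lower x) = false := by
          rw [List.contains_eq_mem]
          rw [decide_eq_false_iff_not]
          intro hmem
          rw [List.mem_map] at hmem
          obtain ⟨a, ha, haeq⟩ := hmem
          have hk := lt_of_lt_of_le hxy (hs.1 a ha)
          rw [haeq] at hk
          exact absurd hk (lt_irrefl _)
        rw [hb1, hb2]
        rfl
      rw [hnm, if_neg (by simp)]
      have hddyt : dd last (y :: t) = y :: dd (some (PySem.Str.lower y)) t := by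
        simp only [dd]
        rw [hylastne, if_pos rfl]
      rw [hddyt]
      simp only [PySem.List.insertBy]
      rw [if_pos (decide_eq_true hxy)]
      simp only [dd]
      rw [hxne, if_pos rfl, hyxne, if_pos rfl]
    · by_cases heq : PySem.Str.lower x = PySem.Str.lower y
      · have hylastne : (some (PySem.Str.lower y) != last) = true := by
          cases last with
          | none => rfl
          | some k =>
            refine bne_iff_ne.mpr (fun hh => ?_)
            rw [Option.some.injEq] at hh
            have hk := hl k rfl
            rw [← hh, ← heq] at hk
            exact absurd hk (lt_irrefl _)
        have hnm : ((y :: t).map (fun a => PySem.Str.lower a)).contains (PySem.Str.lower x) = true := by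
          simp only [List.map_cons, List.contains_cons]
          have hb1 : (PySem.Str.lower x == PySem.Str.lower y) = true := beq_iff_eq.mpr heq
          rw [hb1, Bool.true_or]
        rw [if_neg (by simp only [decide_eq_true_eq]; exact hxy), hnm, if_pos rfl]
        have hdd1 : ∀ l, dd last (y :: l) = y :: dd (some (PySem.Str.lower y)) l := by
          intro l
          simp only [dd]
          rw [hylastne, if_pos rfl]
        rw [hdd1, hdd1, ← heq,
          dd_insert_eq_key x t hs.2 (fun a ha => by rw [heq]; exact hs.1 a ha)]
      · have hyx : PySem.Str.lower y < PySem.Str.lower x :=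
          lt_of_le_of_ne (not_lt.1 hxy) (fun hh => heq hh.symm)
        have hnm : ((y :: t).map (fun a => PySem.Str.lower a)).contains (PySem.Str.lower x)
            = (t.map (fun a => PySem.Str.lower a)).contains (PySem.Str.lower x) := by
          simp only [List.map_cons, List.contains_cons]
          rw [beq_eq_false_iff_ne.mpr heq, Bool.false_or]
        rw [if_neg (by simp only [decide_eq_true_eq]; exact hxy), hnm]
        by_cases hyl : (some (PySem.Str.lower y) != last) = true
        · have hdd1 : ∀ l, dd last (y :: l) = y :: dd (some (PySem.Str.lower y)) l := by
            intro l
            simp only [dd]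
            rw [hyl, if_pos rfl]
          rw [hdd1, hdd1, ih hs.2 (some (PySem.Str.lower y)) (by intro k hk; rw [Option.some.injEq] at hk; rw [← hk]; exact hyx)]
          by_cases hc : (t.map (fun a => PySem.Str.lower a)).contains (PySem.Str.lower x) = true
          · rw [hc, if_pos rfl, if_pos rfl]
          · have hcf := bool_not_true hc
            rw [hcf, if_neg (by simp), if_neg (by simp)]
            simp only [PySem.List.insertBy]
            rw [if_neg (by simp only [decide_eq_true_eq]; exact hxy)]
        · have hyleq : (some (PySem.Str.lower y) != last) = false := bool_not_true hyl
          have hdd0 : ∀ l, dd last (y :: l) = dd last l := by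
            intro l
            simp only [dd]
            rw [hyleq, if_neg (by simp)]
          rw [hdd0, hdd0, ih hs.2 last hl]

theorem dK_append_singleton (xs : List String) (x : String) (seen : PySem.Set String) :
    dK seen (xs ++ [x])
    = dK seen xs ++
      (if PySem.Set.contains seen (PySem.Str.lower x)
          || (xs.map (fun a => PySem.Str.lower a)).contains (PySem.Str.lower x)
       then [] else [x]) := by
  induction xs generalizing seen with
  | nil =>
    simp only [List.nil_append, List.map_nil, List.contains_nil, Bool.or_false, dK]
  | cons a xs ih =>
    simp only [List.cons_append, dK]
    by_cases h : PySem.Set.contains seen (PySem.Str.lower a) = true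
    · rw [h, if_pos rfl, if_pos rfl, ih]
      have hcond : (PySem.Set.contains seen (PySem.Str.lower x)
            || ((a :: xs).map (fun a => PySem.Str.lower a)).contains (PySem.Str.lower x))
          = (PySem.Set.contains seen (PySem.Str.lower x)
            || (xs.map (fun a => PySem.Str.lower a)).contains (PySem.Str.lower x)) := by
        simp only [List.map_cons, List.contains_cons]
        by_cases hax : PySem.Str.lower x = PySem.Str.lower a
        · rw [hax, h, beq_iff_eq.mpr rfl, Bool.true_or, Bool.true_or]
        · rw [beq_eq_false_iff_ne.mpr hax, Bool.false_or]
      rw [hcond]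
    · have hf := bool_not_true h
      rw [hf, if_neg (by simp), if_neg (by simp), ih]
      have hadd : PySem.Set.add seen (PySem.Str.lower a) = seen ++ [PySem.Str.lower a] := by
        simp only [PySem.Set.add, PySem.Set.contains]
        exact if_neg h
      have hcond : (PySem.Set.contains (PySem.Set.add seen (PySem.Str.lower a)) (PySem.Str.lower x)
            || (xs.map (fun a => PySem.Str.lower a)).contains (PySem.Str.lower x))
          = (PySem.Set.contains seen (PySem.Str.lower x)
            || ((a :: xs).map (fun a => PySem.Str.lower a)).contains (PySem.Str.lower x)) := by
        rw [hadd]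
        simp only [PySem.Set.contains, List.contains_append, List.contains_cons, List.contains_nil,
          List.map_cons, Bool.or_false]
        rw [Bool.or_assoc]
      rw [hcond, List.cons_append]

theorem sorted_append_singleton (xs : List String) (x : String) :
    PySem.List.sorted (xs ++ [x]) (fun a => PySem.Str.lower a) false
    = PySem.List.insertBy (fun a b => decide (PySem.Str.lower a < PySem.Str.lower b)) x
        (PySem.List.sorted xs (fun a => PySem.Str.lower a) false) := by
  rw [PySem.List.sorted_eq_foldl_insertBy, PySem.List.sorted_eq_foldl_insertBy,
    List.foldl_append, List.foldl_cons, List.foldl_nil]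

theorem dd_sorted_eq (xs : List String) :
    dd none (PySem.List.sorted xs (fun a => PySem.Str.lower a) false)
    = PySem.List.sorted (dK PySem.Set.empty xs) (fun a => PySem.Str.lower a) false := by
  induction xs using List.reverseRecOn with
  | nil => simp [PySem.List.sorted_eq_foldl_insertBy, dK, dd]
  | append_singleton xs x ih =>
    rw [sorted_append_singleton,
      dd_insertBy x (PySem.List.sorted xs (fun a => PySem.Str.lower a) false)
        (PySem.List.sorted_pairwise xs (fun a => PySem.Str.lower a)) none
        (by intro k hk; cases hk)]
    have hmem : ((PySem.List.sorted xs (fun a => PySem.Str.lower a) false).map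
          (fun a => PySem.Str.lower a)).contains (PySem.Str.lower x)
        = (xs.map (fun a => PySem.Str.lower a)).contains (PySem.Str.lower x) := by
      rw [List.contains_eq_mem, List.contains_eq_mem]
      refine decide_eq_decide.mpr ?_
      simp only [List.mem_map]
      constructor
      · rintro ⟨a, ha, h⟩
        exact ⟨a, (PySem.List.mem_sorted xs (fun a => PySem.Str.lower a) false a).1 ha, h⟩
      · rintro ⟨a, ha, h⟩
        exact ⟨a, (PySem.List.mem_sorted xs (fun a => PySem.Str.lower a) false a).2 ha, h⟩
    rw [hmem, dK_append_singleton]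
    have hempty : PySem.Set.contains PySem.Set.empty (PySem.Str.lower x) = false := rfl
    rw [hempty, Bool.false_or]
    by_cases hc : (xs.map (fun a => PySem.Str.lower a)).contains (PySem.Str.lower x) = true
    · rw [hc, if_pos rfl, if_pos rfl, List.append_nil, ih]
    · have hcf := bool_not_true hc
      rw [hcf, if_neg (by simp), if_neg (by simp), sorted_append_singleton, ih]

-- ===== VERDICT (by name: the statement is the Claim_ definition above) =====
theorem normalize_db_list_spec : Claim_equal_normalize_db_list := by
  intro values _
  unfold Spec_normalize_db_list normalize_db_list normalize_db_list_alt
  simp only [foldA_eq, foldB_eq, List.nil_append]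
  exact (dd_sorted_eq _).symm
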